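-- pv_equiv track=rewrite | github.com/pathanyawarkhan785/LeetCode | 2575. Find the Divisibility Array of a String.py | divisibilityArray
-- ===== SOURCE A (Python) =====
-- def divisibilityArray(word: str, m: int) -> list[int]:
--     res = [0] * len(word)
--     currNum = 0
--
--     for i in range(len(word)):
--         currNum = currNum * 10 + int(word[i])
--         if currNum % m == 0:
--             res[i] = 1
--         currNum %= m
--
--     return res
-- ===== SOURCE B (Python) =====
-- def divisibilityArray(word: str, m: int) -> list[int]:
--     # Stateless per-prefix recomputation: the i-th entry tests the exact
--     # integer value of word[:i+1] (built by Horner over its digits) for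
--     # divisibility by m; no running remainder is carried between entries.
--     def prefix_value(prefix):
--         value = 0
--         for ch in prefix:
--             value = value * 10 + int(ch)
--         return value
--     return [1 if prefix_value(word[:i + 1]) % m == 0 else 0 for i in range(len(word))]
-- ===== Notes on version B (the rewrite author's own statement) =====
-- stated objective: alternative
-- what changed: A's single pass carrying a running remainder and writing into a preallocated list is replaced by a stateless list comprehension that, for each index, rebuilds the exact integer value of that prefix by a fresh inner Horner scan and tests it for divisibility once.
import Mathlib
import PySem

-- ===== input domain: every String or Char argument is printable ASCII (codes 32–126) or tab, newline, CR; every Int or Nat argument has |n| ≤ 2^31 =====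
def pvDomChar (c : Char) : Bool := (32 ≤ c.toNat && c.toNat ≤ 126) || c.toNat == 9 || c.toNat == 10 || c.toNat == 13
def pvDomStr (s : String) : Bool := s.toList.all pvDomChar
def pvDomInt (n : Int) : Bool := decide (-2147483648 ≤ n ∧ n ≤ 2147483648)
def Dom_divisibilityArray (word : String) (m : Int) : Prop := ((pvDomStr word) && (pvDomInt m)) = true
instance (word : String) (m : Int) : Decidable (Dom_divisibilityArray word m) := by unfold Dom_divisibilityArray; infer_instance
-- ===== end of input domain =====

-- B replaces A's single pass with a running remainder by a stateless per-prefix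
-- recomputation (each entry rebuilds the exact integer value of its prefix); objective: alternative.

-- ===== PORT A =====
def divisibilityArray (word : String) (m : Int) : List Int :=
  let cs := word.toList
  let res0 : List Int := List.replicate cs.length 0
  let fin := (PySem.List.pyRange 0 (PySem.Str.len word) 1).foldl
    (fun (st : List Int × Int) i =>
      let d : Int := ((PySem.List.pyGet? cs i).bind (fun c => PySem.Int.ofChars? [c])).getD 0
      let curr : Int := st.2 * 10 + d
      ((if PySem.Int.mod curr m = 0 then PySem.List.pySetD st.1 i 1 else st.1),
       PySem.Int.mod curr m))
    (res0, 0)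
  fin.1

-- ===== PORT B =====
-- helper of B: exact integer value of a digit prefix (Horner over int(ch))
def pvPrefixValue (p : List Char) : Int :=
  p.foldl (fun v c => v * 10 + (PySem.Int.ofChars? [c]).getD 0) 0

def divisibilityArray_alt (word : String) (m : Int) : List Int :=
  (PySem.List.pyRange 0 (PySem.Str.len word) 1).map
    (fun i =>
      if PySem.Int.mod (pvPrefixValue (PySem.List.slice word.toList none (some (i + 1)))) m = 0
      then (1 : Int) else 0)

-- ===== PRECONDITION & SPEC =====
-- Pre_ excludes exactly the inputs where Python A raises: a non-digit character
-- (int() ValueError) or m = 0 with a nonempty word (ZeroDivisionError).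
def Pre_divisibilityArray (word : String) (m : Int) : Prop :=
  word.toList.all Char.isDigit = true ∧ (word.toList = [] ∨ m ≠ 0)
instance (word : String) (m : Int) : Decidable (Pre_divisibilityArray word m) := by
  unfold Pre_divisibilityArray; infer_instance

def pvWitness_divisibilityArray : String × Int := ("150", 3)

def Spec_divisibilityArray (word : String) (m : Int) (out : List Int) : Prop := out = divisibilityArray_alt word m
instance (word : String) (m : Int) (out : List Int) : Decidable (Spec_divisibilityArray word m out) := by unfold Spec_divisibilityArray; infer_instance

-- ===== CLAIM (what is proved, stated in full; the proofs are below) =====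
def Claim_equal_divisibilityArray : Prop := ∀ (word : String) (m : Int), Dom_divisibilityArray word m → Pre_divisibilityArray word m → Spec_divisibilityArray word m (divisibilityArray word m)

-- ===== LEMMAS AND PROOFS =====

-- the value B's comprehension puts at position j
def pvEnt (cs : List Char) (m : Int) (j : Nat) : Int :=
  if PySem.Int.mod (pvPrefixValue (cs.take (j + 1))) m = 0 then 1 else 0

-- A's loop body, named for the induction
def pvStep (cs : List Char) (m : Int) (st : List Int × Int) (i : Int) : List Int × Int :=
  let d : Int := ((PySem.List.pyGet? cs i).bind (fun c => PySem.Int.ofChars? [c])).getD 0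
  let curr : Int := st.2 * 10 + d
  ((if PySem.Int.mod curr m = 0 then PySem.List.pySetD st.1 i 1 else st.1),
   PySem.Int.mod curr m)

lemma pvPrefixValue_take_succ (cs : List Char) (k : Nat) (hk : k < cs.length) :
    pvPrefixValue (cs.take (k + 1))
      = pvPrefixValue (cs.take k) * 10 + (PySem.Int.ofChars? [cs[k]]).getD 0 := by
  unfold pvPrefixValue
  rw [List.take_succ_eq_append_getElem hk, List.foldl_append]
  rfl

-- Python's a % m is congruent to a modulo m (any m, via floordiv_mul_add_mod)
lemma pvMod_modEq (a m : Int) : Int.ModEq m (PySem.Int.mod a m) a := by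
  have h := PySem.Int.floordiv_mul_add_mod a m
  have h2 : PySem.Int.mod a m = a - PySem.Int.floordiv a m * m := by omega
  rw [h2]
  unfold Int.ModEq
  exact Int.sub_mul_emod_self_right a _ m

-- the divisibility test depends only on the congruence class
lemma pvMod_zero_iff (a b m : Int) (h : Int.ModEq m a b) :
    (PySem.Int.mod a m = 0) ↔ (PySem.Int.mod b m = 0) := by
  rw [PySem.Int.mod_eq_zero_iff_dvd, PySem.Int.mod_eq_zero_iff_dvd]
  exact h.dvd_iff

-- invariant of A's loop: after the indices below k are done, the result list carries
-- B's entries below k and zeros above, and the carried remainder is congruent to the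
-- exact value of the k-prefix
lemma pvLoopA (cs : List Char) (m : Int) :
    ∀ (t k : Nat) (res : List Int) (c : Int),
      cs.length - k = t → k ≤ cs.length →
      res = (List.range k).map (pvEnt cs m) ++ List.replicate (cs.length - k) 0 →
      Int.ModEq m (pvPrefixValue (cs.take k)) c →
      ((PySem.List.pyRange (k : Int) (cs.length : Int) 1).foldl (pvStep cs m) (res, c)).1
        = (List.range cs.length).map (pvEnt cs m) := by
  intro t
  induction t with
  | zero =>
    intro k res c ht hk hres _
    have hk' : k = cs.length := by omega
    subst hk'
    rw [PySem.List.pyRange_one_eq_nil (le_refl _)]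
    simp [hres]
  | succ t ih =>
    intro k res c ht hk hres hmod
    have hklt : k < cs.length := by omega
    rw [PySem.List.pyRange_one_cons (by exact_mod_cast hklt), List.foldl_cons]
    have hget : PySem.List.pyGet? cs (k : Int) = some cs[k] := by
      rw [PySem.List.pyGet?_natCast, List.getElem?_eq_getElem hklt]
    have hd : ((PySem.List.pyGet? cs (k : Int)).bind (fun c => PySem.Int.ofChars? [c])).getD 0
        = (PySem.Int.ofChars? [cs[k]]).getD 0 := by rw [hget]; rfl
    have hcurr : Int.ModEq m (pvPrefixValue (cs.take (k + 1)))
        (c * 10 + (PySem.Int.ofChars? [cs[k]]).getD 0) := by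
      rw [pvPrefixValue_take_succ cs k hklt]
      exact (hmod.mul_right 10).add_right _
    have hcond : (PySem.Int.mod (c * 10 + (PySem.Int.ofChars? [cs[k]]).getD 0) m = 0)
        ↔ (PySem.Int.mod (pvPrefixValue (cs.take (k + 1))) m = 0) :=
      (pvMod_zero_iff _ _ m hcurr.symm)
    have hstep : pvStep cs m (res, c) (k : Int)
        = ((List.range (k+1)).map (pvEnt cs m) ++ List.replicate (cs.length - (k+1)) 0,
           PySem.Int.mod (c * 10 + (PySem.Int.ofChars? [cs[k]]).getD 0) m) := by
      unfold pvStep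
      simp only [hd]
      congr 1
      have hrep : List.replicate (cs.length - k) (0:Int)
          = 0 :: List.replicate (cs.length - (k+1)) 0 := by
        have : cs.length - k = (cs.length - (k+1)) + 1 := by omega
        rw [this, List.replicate_succ]
      have hlen : ((List.range k).map (pvEnt cs m)).length = k := by simp
      rw [List.range_succ, List.map_append, List.append_assoc]
      by_cases hz : PySem.Int.mod (c * 10 + (PySem.Int.ofChars? [cs[k]]).getD 0) m = 0
      · rw [if_pos hz]
        rw [hres, hrep, PySem.List.pySetD_natCast]
        have hset : ((List.range k).map (pvEnt cs m) ++ (0 :: List.replicate (cs.length - (k+1)) (0:Int))).set k 1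
            = (List.range k).map (pvEnt cs m) ++ (1 :: List.replicate (cs.length - (k+1)) 0) := by
          rw [List.set_append_right _ _ (by omega)]
          simp [hlen]
        rw [hset]
        have : pvEnt cs m k = 1 := by unfold pvEnt; rw [if_pos (hcond.mp hz)]
        simp [this]
      · rw [if_neg hz]
        rw [hres, hrep]
        have : pvEnt cs m k = 0 := by
          unfold pvEnt
          rw [if_neg (fun hc => hz (hcond.mpr hc))]
        simp [this]
    rw [hstep]
    have hcast : (k : Int) + 1 = ((k + 1 : Nat) : Int) := by push_cast; ring
    rw [hcast]
    exact ih (k+1) _ _ (by omega) (by omega) rfl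
      ((pvMod_modEq _ m).trans hcurr.symm).symm

lemma pvAlt_eq (word : String) (m : Int) :
    divisibilityArray_alt word m = (List.range word.toList.length).map (pvEnt word.toList m) := by
  unfold divisibilityArray_alt
  rw [PySem.Str.len_eq, PySem.List.pyRange_zero_natCast, List.map_map]
  apply List.map_congr_left
  intro j _
  have h1 : ((j : Int) + 1) = ((j + 1 : Nat) : Int) := by push_cast; ring
  simp only [Function.comp, h1, PySem.List.slice_to_natCast, pvEnt]

-- ===== VERDICT (by name: the statement is the Claim_ definition above) =====
theorem divisibilityArray_spec : Claim_equal_divisibilityArray := by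
  intro word m _ _
  unfold Spec_divisibilityArray
  rw [pvAlt_eq]
  show ((PySem.List.pyRange ((0 : Nat) : Int) (PySem.Str.len word) 1).foldl
      (pvStep word.toList m)
      (List.replicate word.toList.length 0, 0)).1
    = (List.range word.toList.length).map (pvEnt word.toList m)
  rw [PySem.Str.len_eq]
  exact pvLoopA word.toList m word.toList.length 0
    (List.replicate word.toList.length 0) 0 (by omega) (by omega)
    (by simp) (by simp [pvPrefixValue])
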